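-- pv_equiv track=rewrite | github.com/GaboITB/mcp-shield | analyzers/urls.py | _compute_docstring_lines
-- ===== SOURCE A (Python) =====
-- def _compute_docstring_lines(lines: list[str]) -> set[int]:
--     """Pre-compute the set of line indices that fall inside a Python
--     docstring (triple-quoted block).  O(n) per file instead of O(n*m).
--
--     A line is "inside a docstring" if an odd number of triple-quote
--     delimiters have appeared on all preceding lines.
--     """
--     inside: set[int] = set()
--     triple_count = 0
--     for idx, line in enumerate(lines):
--         # Count delimiters on *preceding* lines (exclusive of current)
--         if triple_count % 2 == 1:
--             inside.add(idx)
--         triple_count += line.count('"""') + line.count("'''")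
--     return inside
-- ===== SOURCE B (Python) =====
-- def _compute_docstring_lines(lines: list[str]) -> set[int]:
--     # Table-then-filter: build an exclusive prefix-count table of triple-quote
--     # delimiters, then select the indices whose prefix total is odd.
--     prefixes = [0]
--     for line in lines:
--         prefixes.append(prefixes[-1] + line.count('"""') + line.count("'''"))
--     return {i for i in range(len(lines)) if prefixes[i] % 2 == 1}
-- ===== Notes on version B (the rewrite author's own statement) =====
-- stated objective: alternative
-- what changed: Replaces the single running-counter loop (parity checked while scanning) with a two-pass table-then-filter decomposition: first an exclusive prefix-sum table of per-line delimiter counts, then a set comprehension over range(len(lines)) selecting odd prefixes.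
import Mathlib
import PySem

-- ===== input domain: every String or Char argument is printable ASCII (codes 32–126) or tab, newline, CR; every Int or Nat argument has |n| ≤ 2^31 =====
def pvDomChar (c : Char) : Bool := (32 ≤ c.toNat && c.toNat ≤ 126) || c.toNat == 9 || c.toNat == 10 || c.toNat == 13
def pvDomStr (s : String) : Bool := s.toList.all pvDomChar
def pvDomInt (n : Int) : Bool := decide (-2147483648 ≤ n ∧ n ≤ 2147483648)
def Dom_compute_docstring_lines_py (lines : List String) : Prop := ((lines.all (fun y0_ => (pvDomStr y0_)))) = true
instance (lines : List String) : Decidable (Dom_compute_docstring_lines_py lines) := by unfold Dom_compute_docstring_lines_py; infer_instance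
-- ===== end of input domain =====

-- B changes the decomposition only (running-counter loop → prefix table then filter); same O(n) cost.

-- ===== PORT A =====
-- literal port of A: one pass over enumerate(lines), state = (inside set, running triple count)
def compute_docstring_lines_py (lines : List String) : List Int :=
  ((PySem.List.enumerate lines 0).foldl
      (fun (st : PySem.Set Int × Int) p =>
        ( if PySem.Int.mod st.2 2 == 1 then PySem.Set.add st.1 p.1 else st.1,
          st.2 + ((PySem.Str.count p.2 "\"\"\"" : Int) + (PySem.Str.count p.2 "'''" : Int)) ))
      (PySem.Set.empty, 0)).1

-- ===== PORT B =====
-- literal port of B: build prefixes = [0] then append prefixes[-1]+counts per line; then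
-- the set comprehension over range(len(lines)) keeping odd prefixes[i]
def compute_docstring_lines_py_alt (lines : List String) : List Int :=
  let prefixes : List Int :=
    lines.foldl
      (fun pre line =>
        pre ++ [PySem.List.pyGetD pre (-1) 0
                  + ((PySem.Str.count line "\"\"\"" : Int) + (PySem.Str.count line "'''" : Int))])
      [0]
  PySem.Set.ofList
    ((PySem.List.pyRange 0 (lines.length : Int) 1).filter
      (fun i => PySem.Int.mod (PySem.List.pyGetD prefixes i 0) 2 == 1))

-- ===== PRECONDITION & SPEC =====
def Spec_compute_docstring_lines_py (lines : List String) (out : List Int) : Prop := out = compute_docstring_lines_py_alt lines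
instance (lines : List String) (out : List Int) : Decidable (Spec_compute_docstring_lines_py lines out) := by unfold Spec_compute_docstring_lines_py; infer_instance

-- ===== CLAIM (what is proved, stated in full; the proofs are below) =====
def Claim_equal_compute_docstring_lines_py : Prop := ∀ (lines : List String), Dom_compute_docstring_lines_py lines → Spec_compute_docstring_lines_py lines (compute_docstring_lines_py lines)

-- ===== LEMMAS AND PROOFS =====

-- per-line delimiter count
def pvCnt (l : String) : Int :=
  ((PySem.Str.count l "\"\"\"" : Int) + (PySem.Str.count l "'''" : Int))

-- exclusive prefix scan of the counts (accumulate with initial value a)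
def pvScan : List String → Int → List Int
  | [], a => [a]
  | l :: ls, a => a :: pvScan ls (a + pvCnt l)

-- the common reference value: indices (starting at s) whose exclusive prefix count is odd
def pvOdd : List String → Int → Int → List Int
  | [], _, _ => []
  | l :: ls, s, tc =>
      (if PySem.Int.mod tc 2 = 1 then [s] else []) ++ pvOdd ls (s + 1) (tc + pvCnt l)

theorem pvGetLast (p : List Int) (a : Int) :
    PySem.List.pyGetD (p ++ [a]) (-1) 0 = a := by
  simp [PySem.List.pyGetD, PySem.List.pyGet?, PySem.List.pyIdx?]

theorem pvFoldB (ls : List String) : ∀ (p : List Int) (a : Int),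
    ls.foldl (fun pre line => pre ++ [PySem.List.pyGetD pre (-1) 0 + pvCnt line]) (p ++ [a])
      = p ++ pvScan ls a := by
  induction ls with
  | nil => intro p a; simp [pvScan]
  | cons l ls ih =>
      intro p a
      simp only [List.foldl_cons, pvGetLast, pvScan]
      have := ih (p ++ [a]) (a + pvCnt l)
      simpa using this

theorem pvNatL (ls : List String) : ∀ (tc s : Int),
    List.map (fun k : Nat => s + (k : Int))
        ((List.range ls.length).filter
          (fun k => PySem.Int.mod ((pvScan ls tc).getD k 0) 2 == 1))
      = pvOdd ls s tc := by
  induction ls with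
  | nil => intro tc s; simp [pvOdd]
  | cons l ls ih =>
      intro tc s
      simp only [List.length_cons]
      rw [List.range_succ_eq_map]
      simp only [List.filter_cons, List.filter_map, pvScan, List.getD_cons_zero, pvOdd]
      have hrest : List.map (fun k : Nat => s + (k : Int))
          (List.map Nat.succ ((List.range ls.length).filter
            ((fun k => PySem.Int.mod ((tc :: pvScan ls (tc + pvCnt l)).getD k 0) 2 == 1) ∘ Nat.succ)))
          = pvOdd ls (s + 1) (tc + pvCnt l) := by
        have hpred2 : ((List.range ls.length).filter
            ((fun k => PySem.Int.mod ((tc :: pvScan ls (tc + pvCnt l)).getD k 0) 2 == 1) ∘ Nat.succ))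
            = ((List.range ls.length).filter
              (fun k => PySem.Int.mod ((pvScan ls (tc + pvCnt l)).getD k 0) 2 == 1)) := by
          apply List.filter_congr; intro k _
          simp [Function.comp]
        rw [List.map_map, hpred2, ← ih (tc + pvCnt l) (s + 1)]
        apply List.map_congr_left; intro k _
        simp [Function.comp, Nat.succ_eq_add_one]
        ring
      by_cases h : PySem.Int.mod tc 2 = 1
      · have hb : (PySem.Int.mod tc 2 == 1) = true := by simpa using h
        simp only [hb, if_pos, List.map_cons]
        rw [hrest]
        rw [if_pos h]
        simp
      · have hb : ¬ ((PySem.Int.mod tc 2 == 1) = true) := by simpa using h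
        rw [if_neg hb, hrest]
        rw [if_neg h]
        simp

theorem pvAltEq (lines : List String) :
    compute_docstring_lines_py_alt lines = pvOdd lines 0 0 := by
  unfold compute_docstring_lines_py_alt
  have hfold : lines.foldl
      (fun pre line => pre ++ [PySem.List.pyGetD pre (-1) 0
        + ((PySem.Str.count line "\"\"\"" : Int) + (PySem.Str.count line "'''" : Int))]) [0]
      = pvScan lines 0 := by
    have := pvFoldB lines [] 0
    simpa [pvCnt] using this
  simp only [hfold]
  rw [PySem.List.pyRange_one]
  have hlen : ((lines.length : Int) - 0).toNat = lines.length := by omega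
  rw [hlen, List.filter_map]
  have hpred : ((List.range lines.length).filter
      ((fun i => PySem.Int.mod (PySem.List.pyGetD (pvScan lines 0) i 0) 2 == 1)
        ∘ (fun k : Nat => (0 : Int) + (k : Int))))
      = ((List.range lines.length).filter
        (fun k => PySem.Int.mod ((pvScan lines 0).getD k 0) 2 == 1)) := by
    apply List.filter_congr; intro k _
    have h0 : ((0 : Int) + (k : Int)) = ((k : Nat) : Int) := by omega
    simp [Function.comp, h0, PySem.List.pyGetD_natCast]
  rw [hpred]
  have hnd : (List.map (fun k : Nat => (0 : Int) + (k : Int))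
      ((List.range lines.length).filter
        (fun k => PySem.Int.mod ((pvScan lines 0).getD k 0) 2 == 1))).Nodup := by
    apply List.Nodup.map
    · intro a b hab
      have hab2 : (a : Int) = (b : Int) := by simpa using hab
      exact_mod_cast hab2
    · exact List.Nodup.sublist List.filter_sublist List.nodup_range
  rw [PySem.Set.ofList_eq_self_of_nodup _ hnd]
  exact pvNatL lines 0 0

theorem pvAEq (ls : List String) : ∀ (s tc : Int) (inside : List Int),
    (∀ x ∈ inside, x < s) →
    ((PySem.List.enumerate ls s).foldl
      (fun (st : PySem.Set Int × Int) p =>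
        ( if PySem.Int.mod st.2 2 == 1 then PySem.Set.add st.1 p.1 else st.1,
          st.2 + ((PySem.Str.count p.2 "\"\"\"" : Int) + (PySem.Str.count p.2 "'''" : Int)) ))
      (inside, tc)).1 = inside ++ pvOdd ls s tc := by
  induction ls with
  | nil => intro s tc inside _; simp [pvOdd, PySem.List.enumerate]
  | cons l ls ih =>
      intro s tc inside hinv
      rw [PySem.List.enumerate_cons]
      simp only [List.foldl_cons]
      by_cases h : PySem.Int.mod tc 2 = 1
      · have hb : (PySem.Int.mod tc 2 == 1) = true := by simpa using h
        have hnm : s ∉ inside := fun hm => absurd (hinv s hm) (lt_irrefl s)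
        have hadd : PySem.Set.add inside s = inside ++ [s] := PySem.Set.add_of_not_mem hnm
        rw [if_pos hb, hadd]
        have hinv2 : ∀ x ∈ inside ++ [s], x < s + 1 := by
          intro x hx
          rcases List.mem_append.mp hx with hx | hx
          · exact lt_trans (hinv x hx) (by omega)
          · simp at hx; omega
        rw [ih (s + 1) _ _ hinv2]
        simp only [pvOdd]
        rw [if_pos h]
        simp [pvCnt, List.append_assoc]
      · have hb : ¬ ((PySem.Int.mod tc 2 == 1) = true) := by simpa using h
        rw [if_neg hb]
        have hinv2 : ∀ x ∈ inside, x < s + 1 := fun x hx => lt_trans (hinv x hx) (by omega)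
        rw [ih (s + 1) _ _ hinv2]
        simp only [pvOdd, pvCnt]
        rw [if_neg h]
        simp

-- ===== VERDICT (by name: the statement is the Claim_ definition above) =====
theorem compute_docstring_lines_py_spec : Claim_equal_compute_docstring_lines_py := by
  intro lines _
  unfold Spec_compute_docstring_lines_py
  rw [pvAltEq]
  unfold compute_docstring_lines_py
  have := pvAEq lines 0 0 [] (by intro x hx; simp at hx)
  simpa [PySem.Set.empty] using this
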